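-- pv_equiv track=rewrite | github.com/corretaza/corretaza-buscador | seucorretor/crm/utils.py | formata_fone_limpa
-- ===== SOURCE A (Python) =====
-- INVALID_PHONE_CHARS = "()-+."
--
-- def formata_fone_limpa(fone):
--     """ remove caracteres nao numericos do fone """
--     if fone == '(00)0000-0000':
--         return ''
--     if not fone:
--         return ''
--     fone = "".join(fone.split())
--     for digit in INVALID_PHONE_CHARS:
--         fone = fone.replace(digit, "")
--     if not fone.isdigit():
--         fone = ''
--     return fone
-- ===== SOURCE B (Python) =====
-- INVALID_PHONE_CHARS = "()-+."
--
-- def formata_fone_limpa(fone):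
--     """ remove caracteres nao numericos do fone """
--     if fone == '(00)0000-0000':
--         return ''
--     if not fone:
--         return ''
--     buf = []
--     invalid = False
--     for c in fone:
--         if c.isdigit():
--             buf.append(c)
--         elif c.isspace() or c in INVALID_PHONE_CHARS:
--             pass
--         else:
--             invalid = True
--     if invalid or not buf:
--         return ''
--     return ''.join(buf)
-- ===== Notes on version B (the rewrite author's own statement) =====
-- stated objective: alternative
-- what changed: Replaced A's multi-pass pipeline (split/join to drop whitespace, five replace passes for punctuation, then an isdigit scan) by one single traversal of the string that accumulates digit characters and a validity flag.
import Mathlib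
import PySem

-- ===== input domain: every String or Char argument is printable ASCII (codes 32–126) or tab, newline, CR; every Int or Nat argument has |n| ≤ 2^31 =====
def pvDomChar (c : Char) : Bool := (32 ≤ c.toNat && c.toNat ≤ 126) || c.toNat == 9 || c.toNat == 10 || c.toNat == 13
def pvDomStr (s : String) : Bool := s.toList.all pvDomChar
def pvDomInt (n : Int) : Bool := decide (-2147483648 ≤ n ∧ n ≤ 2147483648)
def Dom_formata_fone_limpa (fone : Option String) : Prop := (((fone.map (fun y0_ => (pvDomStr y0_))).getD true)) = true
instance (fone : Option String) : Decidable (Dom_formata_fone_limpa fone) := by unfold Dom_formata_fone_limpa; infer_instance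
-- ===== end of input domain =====

-- B replaces A's multi-pass pipeline (split/join, five replace passes, isdigit scan) by one
-- single traversal accumulating the digit characters and a validity flag (objective: alternative).

-- INVALID_PHONE_CHARS = "()-+."  (module-level constant, as its character list)
def pvInvalidPhoneChars : List Char := ['(', ')', '-', '+', '.']

-- ===== PORT A =====
def formata_fone_limpa (fone : Option String) : String :=
  if fone = some "(00)0000-0000" then ""
  else
    match fone with
    | none => ""
    | some s =>
      if s = "" then ""
      else
        -- fone = "".join(fone.split())
        let f1 := PySem.Chars.join [] (PySem.Chars.split₀ s.toList)
        -- for digit in INVALID_PHONE_CHARS: fone = fone.replace(digit, "")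
        let f2 := pvInvalidPhoneChars.foldl (fun acc d => PySem.Chars.replace acc [d] []) f1
        -- if not fone.isdigit(): fone = ''
        if PySem.Chars.strIsdigit f2 then String.mk f2 else ""

-- ===== PORT B =====
def formata_fone_limpa_alt (fone : Option String) : String :=
  if fone = some "(00)0000-0000" then ""
  else
    match fone with
    | none => ""
    | some s =>
      if s = "" then ""
      else
        let st := s.toList.foldl
          (fun (acc : List Char × Bool) c =>
            if PySem.Chars.isdigit c then (acc.1 ++ [c], acc.2)
            else if PySem.Chars.isspace c || pvInvalidPhoneChars.contains c then acc
            else (acc.1, true))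
          ([], false)
        if st.2 || st.1.isEmpty then "" else String.mk st.1

-- ===== PRECONDITION & SPEC =====
def Spec_formata_fone_limpa (fone : Option String) (out : String) : Prop := out = formata_fone_limpa_alt fone
instance (fone : Option String) (out : String) : Decidable (Spec_formata_fone_limpa fone out) := by unfold Spec_formata_fone_limpa; infer_instance

-- ===== CLAIM (what is proved, stated in full; the proofs are below) =====
def Claim_equal_formata_fone_limpa : Prop := ∀ (fone : Option String), Dom_formata_fone_limpa fone → Spec_formata_fone_limpa fone (formata_fone_limpa fone)

-- ===== LEMMAS AND PROOFS =====

-- "".join(s.split()) removes exactly the whitespace characters.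
theorem split₀_go_flatten (cs cur : List Char) (acc : List (List Char)) :
    (PySem.Chars.split₀.go cs cur acc).flatten
      = acc.reverse.flatten ++ cur.reverse ++ cs.filter (fun c => !PySem.Chars.isspace c) := by
  induction cs generalizing cur acc with
  | nil =>
    simp only [PySem.Chars.split₀.go]
    split_ifs with h
    · simp_all [List.isEmpty_iff]
    · simp
  | cons c rest ih =>
    simp only [PySem.Chars.split₀.go]
    by_cases hs : PySem.Chars.isspace c
    · simp only [hs, if_pos]
      by_cases hc : cur.isEmpty
      · simp_all [List.filter_cons, List.isEmpty_iff]
      · simp_all [List.filter_cons]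
    · simp [hs, ih, List.filter_cons]

theorem join_split₀ (cs : List Char) :
    PySem.Chars.join [] (PySem.Chars.split₀ cs) = cs.filter (fun c => !PySem.Chars.isspace c) := by
  have hI : ∀ xs : List (List Char), ([] : List Char).intercalate xs = xs.flatten := by
    intro xs
    simp [List.intercalate]
    induction xs with
    | nil => simp
    | cons a t ih => cases t <;> simp_all [List.intersperse]
  simpa [PySem.Chars.join, hI, PySem.Chars.split₀] using split₀_go_flatten cs [] []

-- s.replace(single_char, "") is a filter.
theorem replace_go_single (d : Char) (l acc : List Char) (fuel : Nat) (h : l.length ≤ fuel) :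
    PySem.Chars.replace.go [d] [] fuel l acc
      = acc.reverse ++ l.filter (fun c => !(c == d)) := by
  induction l generalizing acc fuel with
  | nil => cases fuel <;> simp [PySem.Chars.replace.go]
  | cons c t ih =>
    cases fuel with
    | zero => simp at h
    | succ n =>
      simp only [PySem.Chars.replace.go]
      by_cases hd : d = c
      · subst hd
        have hpre : [d].isPrefixOf (d :: t) = true := by simp [List.isPrefixOf]
        simp only [hpre, if_pos, List.length_singleton, List.drop_one, List.tail_cons,
          List.reverse_nil, List.nil_append]
        rw [ih _ n (by simpa using Nat.le_of_succ_le_succ h)]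
        simp [List.filter_cons]
      · have hpre : [d].isPrefixOf (c :: t) = false := by
          simp only [List.isPrefixOf, Bool.and_eq_false_iff, beq_eq_false_iff_ne, ne_eq]
          left; exact hd
        simp only [hpre, Bool.false_eq_true, if_neg, not_false_iff]
        rw [ih _ n (by simpa using Nat.le_of_succ_le_succ h)]
        simp [List.filter_cons, Ne.symm hd]

theorem replace_single (d : Char) (cs : List Char) :
    PySem.Chars.replace cs [d] [] = cs.filter (fun c => !(c == d)) := by
  simpa [PySem.Chars.replace] using replace_go_single d cs [] cs.length (le_refl _)

-- a character is "bad" when it is neither a digit, whitespace nor one of "()-+."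
def pvBad (c : Char) : Bool :=
  !(PySem.Chars.isdigit c || PySem.Chars.isspace c || pvInvalidPhoneChars.contains c)

-- B's fold, characterised.
theorem alt_fold (cs : List Char) (buf : List Char) (inv : Bool) :
    cs.foldl
      (fun (acc : List Char × Bool) c =>
        if PySem.Chars.isdigit c then (acc.1 ++ [c], acc.2)
        else if PySem.Chars.isspace c || pvInvalidPhoneChars.contains c then acc
        else (acc.1, true))
      (buf, inv)
      = (buf ++ cs.filter PySem.Chars.isdigit, inv || cs.any pvBad) := by
  induction cs generalizing buf inv with
  | nil => simp
  | cons c t ih =>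
    simp only [List.foldl_cons, List.filter_cons, List.any_cons]
    by_cases hd : PySem.Chars.isdigit c = true
    · rw [if_pos hd, ih]
      simp [pvBad, hd]
    · rw [if_neg hd]
      by_cases hs : (PySem.Chars.isspace c || pvInvalidPhoneChars.contains c) = true
      · rw [if_pos hs, ih]
        have hbc : pvBad c = false := by
          unfold pvBad; rw [Bool.or_assoc, hs]; simp
        simp [hd, hbc]
      · rw [if_neg hs, ih]
        have hd2 : PySem.Chars.isdigit c = false := by simpa using hd
        have hs2 : (PySem.Chars.isspace c || pvInvalidPhoneChars.contains c) = false := by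
          simpa using hs
        have hbc : pvBad c = true := by
          unfold pvBad; rw [Bool.or_assoc, hs2, hd2]; rfl
        rw [hbc]
        simp [hd]

-- a digit character is neither whitespace nor one of "()-+."
theorem digit_keep (c : Char) (hd : PySem.Chars.isdigit c = true) :
    PySem.Chars.isspace c = false ∧ pvInvalidPhoneChars.contains c = false := by
  simp only [PySem.Chars.isdigit, Bool.and_eq_true, decide_eq_true_eq, Char.le_def] at hd
  have hlo : 48 ≤ c.toNat := hd.1
  have hhi : c.toNat ≤ 57 := hd.2
  constructor
  · simp only [PySem.Chars.isspace]
    simp only [Bool.or_eq_false_iff, Bool.and_eq_false_iff, decide_eq_false_iff_not]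
    omega
  · simp only [pvInvalidPhoneChars, List.contains_eq_mem, decide_eq_false_iff_not]
    intro hmem
    simp only [List.mem_cons, List.not_mem_nil, or_false] at hmem
    rcases hmem with rfl | rfl | rfl | rfl | rfl <;> exact absurd hlo (by decide)

-- A's three passes collapse to one filter
theorem pipeline_filter (cs : List Char) :
    pvInvalidPhoneChars.foldl (fun acc d => PySem.Chars.replace acc [d] [])
        (PySem.Chars.join [] (PySem.Chars.split₀ cs))
      = cs.filter (fun c => !PySem.Chars.isspace c && !(pvInvalidPhoneChars.contains c)) := by
  rw [join_split₀]
  simp only [pvInvalidPhoneChars, List.foldl_cons, List.foldl_nil, replace_single,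
    List.filter_filter]
  apply List.filter_congr
  intro c _
  by_cases h : PySem.Chars.isspace c = true
  · simp [h]
  · simp only [Bool.not_eq_true] at h
    simp only [List.contains_eq_mem, List.mem_cons, List.not_mem_nil, or_false, h]
    by_cases h1 : c = '(' <;> by_cases h2 : c = ')' <;> by_cases h3 : c = '-' <;>
      by_cases h4 : c = '+' <;> by_cases h5 : c = '.' <;>
      simp [h1, h2, h3, h4, h5]

-- the core equivalence on the character list
theorem core_eq (cs : List Char) :
    (let f1 := PySem.Chars.join [] (PySem.Chars.split₀ cs)
     let f2 := pvInvalidPhoneChars.foldl (fun acc d => PySem.Chars.replace acc [d] []) f1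
     if PySem.Chars.strIsdigit f2 then String.mk f2 else "")
    = (let st := cs.foldl
          (fun (acc : List Char × Bool) c =>
            if PySem.Chars.isdigit c then (acc.1 ++ [c], acc.2)
            else if PySem.Chars.isspace c || pvInvalidPhoneChars.contains c then acc
            else (acc.1, true))
          ([], false)
       if st.2 || st.1.isEmpty then "" else String.mk st.1) := by
  simp only [alt_fold cs [] false, pipeline_filter cs, Bool.false_or, List.nil_append]
  by_cases hb : cs.any pvBad = true
  · -- some stray character: both sides return ""
    obtain ⟨c, hc, hprop⟩ := List.any_eq_true.mp hb
    simp only [pvBad, Bool.not_eq_true', Bool.or_eq_false_iff] at hprop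
    obtain ⟨⟨hnd, hns⟩, hnp⟩ := hprop
    have hnp' : c ∉ pvInvalidPhoneChars := by simpa using hnp
    have hstr : PySem.Chars.strIsdigit
        (cs.filter (fun c => !PySem.Chars.isspace c && !(pvInvalidPhoneChars.contains c))) = false := by
      simp only [PySem.Chars.strIsdigit, Bool.and_eq_false_iff]
      right
      rw [List.all_eq_false]
      exact ⟨c, List.mem_filter.mpr ⟨hc, by simp [hns, hnp']⟩, by simp [hnd]⟩
    rw [hstr, hb]
    simp
  · -- no stray character: the two filters coincide and both guards agree
    have hb' : cs.any pvBad = false := by simpa using hb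
    have hall : ∀ c ∈ cs,
        (PySem.Chars.isdigit c || PySem.Chars.isspace c || pvInvalidPhoneChars.contains c) = true := by
      intro c hc
      have h2 : pvBad c = false := by simpa using List.any_eq_false.mp hb' c hc
      unfold pvBad at h2
      rwa [Bool.not_eq_false'] at h2
    have hfeq : cs.filter (fun c => !PySem.Chars.isspace c && !(pvInvalidPhoneChars.contains c))
        = cs.filter PySem.Chars.isdigit := by
      apply List.filter_congr
      intro c hc
      by_cases hd : PySem.Chars.isdigit c = true
      · obtain ⟨h1, h2⟩ := digit_keep c hd
        have h2' : c ∉ pvInvalidPhoneChars := by simpa using h2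
        simp [h1, h2', hd]
      · have hor := hall c hc
        simp only [Bool.not_eq_true] at hd
        rw [hd, Bool.false_or] at hor
        rcases (Bool.or_eq_true _ _).mp hor with h | h
        · simp [h, hd]
        · have h' : c ∈ pvInvalidPhoneChars := by simpa using h
          simp [h', hd]
    have hallD : (cs.filter PySem.Chars.isdigit).all PySem.Chars.isdigit = true :=
      List.all_eq_true.mpr fun c hc => (List.mem_filter.mp hc).2
    rw [hfeq, hb', Bool.false_or]
    cases hE : (cs.filter PySem.Chars.isdigit).isEmpty <;>
      simp [PySem.Chars.strIsdigit, hE, hallD]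

-- ===== VERDICT (by name: the statement is the Claim_ definition above) =====
theorem formata_fone_limpa_spec : Claim_equal_formata_fone_limpa := by
  intro fone _
  unfold Spec_formata_fone_limpa formata_fone_limpa formata_fone_limpa_alt
  rcases fone with _ | s
  · rfl
  · by_cases hg : (some s : Option String) = some "(00)0000-0000"
    · rw [if_pos hg, if_pos hg]
    · rw [if_neg hg, if_neg hg]
      show (if s = "" then "" else _) = (if s = "" then "" else _)
      by_cases hs : s = ""
      · rw [if_pos hs, if_pos hs]
      · rw [if_neg hs, if_neg hs]
        exact core_eq s.toList
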